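-- pv_equiv track=rewrite | github.com/max-bm/advent-of-code-2023 | day11/main.py | expand_vertical
-- ===== SOURCE A (Python) =====
-- from typing import List
--
-- def expand_vertical(puzzle_input: List[str]) -> List[str]:
--     rows_to_add = []
--     for i, line in enumerate(puzzle_input):
--         if all(x == "." for x in line):
--             rows_to_add.append(i)
--     for i, r in enumerate(rows_to_add):
--         puzzle_input.insert(r + i, "." * len(puzzle_input[0]))
--     return puzzle_input
-- ===== SOURCE B (Python) =====
-- from typing import List
--
-- def expand_vertical(puzzle_input: List[str]) -> List[str]:
--     # Single pass: rebuild the list, placing a fresh all-dots row (first-row width)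
--     # before each all-empty row; then mutate the caller's list in place.
--     width = len(puzzle_input[0]) if puzzle_input else 0
--     new_rows = []
--     for line in puzzle_input:
--         if all(c == "." for c in line):
--             new_rows.append("." * width)
--         new_rows.append(line)
--     puzzle_input[:] = new_rows
--     return puzzle_input
-- ===== Notes on version B (the rewrite author's own statement) =====
-- stated objective: simpler
-- what changed: Replaces A's two-phase scheme (collect empty-row indices, then re-insert with offset-adjusted positions and repeated indexing of the mutating list) with a single pass that rebuilds the list, emitting a constant-width dots row before each all-empty row, then assigns it back in place.
import Mathlib
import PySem

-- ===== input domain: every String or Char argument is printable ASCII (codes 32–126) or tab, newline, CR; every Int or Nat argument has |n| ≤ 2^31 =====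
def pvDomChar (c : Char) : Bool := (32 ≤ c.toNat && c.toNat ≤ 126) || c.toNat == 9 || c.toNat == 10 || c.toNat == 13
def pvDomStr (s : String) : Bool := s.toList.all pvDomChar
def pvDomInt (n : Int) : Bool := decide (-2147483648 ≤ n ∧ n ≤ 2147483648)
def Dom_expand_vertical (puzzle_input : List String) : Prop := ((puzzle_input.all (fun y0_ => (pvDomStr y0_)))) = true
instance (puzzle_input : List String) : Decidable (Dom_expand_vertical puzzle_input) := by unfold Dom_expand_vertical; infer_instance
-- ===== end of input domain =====

-- B replaces A's collect-indices-then-offset-insert scheme by a single rebuilding pass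
-- (objective: simpler). Both Pythons mutate the argument list in place identically;
-- the equivalence proved here is about the return value.

-- ===== PORT A =====
-- "." * len(s) is ported as String.ofList (List.replicate len '.') — exact for a Nat length.
-- puzzle_input[0] inside the insert loop is ported with pyGetD _ 0 "": the loop body only runs
-- when rows_to_add is nonempty, hence the list is nonempty and Python never raises there.
def expand_vertical (puzzle_input : List String) : List String :=
  let rows_to_add : List Int :=
    (PySem.List.enumerate puzzle_input 0).foldl
      (fun acc p => if p.2.toList.all (fun c => c == '.') then acc ++ [p.1] else acc) []
  (PySem.List.enumerate rows_to_add 0).foldl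
    (fun cur p =>
      PySem.List.insert cur (p.2 + p.1)
        (String.ofList (List.replicate (PySem.List.pyGetD cur 0 "").toList.length '.')))
    puzzle_input

-- ===== PORT B =====
def expand_vertical_alt (puzzle_input : List String) : List String :=
  let width : Nat := match puzzle_input with | [] => 0 | h :: _ => h.toList.length
  let dots : String := String.ofList (List.replicate width '.')
  puzzle_input.foldl
    (fun acc line =>
      (if line.toList.all (fun c => c == '.') then acc ++ [dots] else acc) ++ [line]) []

-- ===== PRECONDITION & SPEC =====
def Spec_expand_vertical (puzzle_input : List String) (out : List String) : Prop := out = expand_vertical_alt puzzle_input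
instance (puzzle_input : List String) (out : List String) : Decidable (Spec_expand_vertical puzzle_input out) := by unfold Spec_expand_vertical; infer_instance

-- ===== CLAIM (what is proved, stated in full; the proofs are below) =====
def Claim_equal_expand_vertical : Prop := ∀ (puzzle_input : List String), Dom_expand_vertical puzzle_input → Spec_expand_vertical puzzle_input (expand_vertical puzzle_input)

-- ===== LEMMAS AND PROOFS =====

/-- the "all dots" row test of both programs -/
def pvP (s : String) : Bool := s.toList.all (fun c => c == '.')

/-- an all-dots row of width w -/
def pvDots (w : Nat) : String := String.ofList (List.replicate w '.')

/-- what one input row contributes to the output (dots row inserted BEFORE an empty row) -/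
def pvG (w : Nat) (s : String) : List String := if pvP s then [pvDots w, s] else [s]

/-- Nat indices of the all-dots rows, in order. -/
def pvRows : List String → List Nat
  | [] => []
  | x :: xs => (if pvP x then [0] else []) ++ (pvRows xs).map (· + 1)

lemma pvDots_toList_length (w : Nat) : (pvDots w).toList.length = w := by simp [pvDots]

/-- A's first loop collects exactly the (shifted) indices of the all-dots rows. -/
lemma pv_rows_eq (xs : List String) : ∀ (s : Nat) (acc : List Int),
    (PySem.List.enumerate xs (s : Int)).foldl
      (fun acc p => if p.2.toList.all (fun c => c == '.') then acc ++ [p.1] else acc) acc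
      = acc ++ (pvRows xs).map (fun n => ((s + n : Nat) : Int)) := by
  induction xs with
  | nil => intro s acc; simp [pvRows, PySem.List.enumerate_nil]
  | cons x xs ih =>
    intro s acc
    rw [PySem.List.enumerate_cons]
    have hs : (s : Int) + 1 = ((s + 1 : Nat) : Int) := by push_cast; ring
    by_cases hx : pvP x
    · simp only [List.foldl_cons, pvP] at hx ⊢
      rw [if_pos hx, hs, ih (s + 1)]
      simp [pvRows, pvP, hx, List.map_map, Function.comp]
      intro a _; ring
    · simp only [List.foldl_cons, pvP] at hx ⊢
      rw [if_neg hx, hs, ih (s + 1)]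
      simp [pvRows, pvP, hx, List.map_map, Function.comp]
      intro a _; ring

/-- B's single pass is the flatMap of pvG. -/
lemma pv_b_eq (xs : List String) (w : Nat) : ∀ (acc : List String),
    xs.foldl
      (fun acc line =>
        (if line.toList.all (fun c => c == '.') then acc ++ [pvDots w] else acc) ++ [line]) acc
      = acc ++ xs.flatMap (pvG w) := by
  induction xs with
  | nil => intro acc; simp
  | cons x xs ih =>
    intro acc
    simp only [List.foldl_cons, List.flatMap_cons]
    by_cases hx : pvP x
    · simp only [pvP] at hx
      rw [if_pos hx, ih]
      simp [pvG, pvP, hx]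
    · simp only [pvP] at hx
      rw [if_neg hx, ih]
      simp [pvG, pvP, hx]

/-- A's insert loop, run from an already-expanded prefix `pre` (m original rows, i inserted
rows, every head along the way of width w), also produces the flatMap of pvG. -/
lemma pv_a_eq (xs : List String) : ∀ (pre : List String) (m i w : Nat),
    pre.length = m + i →
    (∀ h t, pre ++ xs = h :: t → h.toList.length = w) →
    (PySem.List.enumerate ((pvRows xs).map (fun n => ((m + n : Nat) : Int))) (i : Int)).foldl
      (fun cur p =>
        PySem.List.insert cur (p.2 + p.1)
          (String.ofList (List.replicate (PySem.List.pyGetD cur 0 "").toList.length '.')))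
      (pre ++ xs)
      = pre ++ xs.flatMap (pvG w) := by
  induction xs with
  | nil => intro pre m i w _ _; simp [pvRows, PySem.List.enumerate_nil]
  | cons x xs ih =>
    intro pre m i w hlen hw
    have hhead : (PySem.List.pyGetD (pre ++ x :: xs) 0 "").toList.length = w := by
      rw [PySem.List.pyGetD_zero]
      cases pre with
      | nil => exact hw x xs rfl
      | cons a pre' => exact hw a (pre' ++ x :: xs) rfl
    have hmap : ((pvRows xs).map (· + 1)).map (fun n => ((m + n : Nat) : Int))
        = (pvRows xs).map (fun n => (((m + 1) + n : Nat) : Int)) := by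
      rw [List.map_map]; exact List.map_congr_left (fun n _ => by simp; ring)
    have hins : PySem.List.insert (pre ++ x :: xs) ((m : Int) + (i : Int))
          (String.ofList (List.replicate (PySem.List.pyGetD (pre ++ x :: xs) 0 "").toList.length '.'))
        = pre ++ pvDots w :: x :: xs := by
      rw [hhead]
      have : (m : Int) + (i : Int) = ((pre.length : Nat) : Int) := by rw [hlen]; push_cast; ring
      rw [this, PySem.List.insert_natCast _ _ _ (by simp)]
      simp [pvDots]
    by_cases hx : pvP x
    · have hrows : pvRows (x :: xs) = 0 :: (pvRows xs).map (· + 1) := by simp [pvRows, hx]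
      rw [hrows]
      simp only [List.map_cons, PySem.List.enumerate_cons, List.foldl_cons]
      have h0 : ((m + 0 : Nat) : Int) + (i : Int) = (m : Int) + (i : Int) := by push_cast; ring
      rw [h0, hins, hmap]
      have hcast : (i : Int) + 1 = ((i + 1 : Nat) : Int) := by push_cast; ring
      rw [hcast]
      have := ih (pre ++ [pvDots w, x]) (m + 1) (i + 1) w
        (by simp [hlen]; omega)
        (by intro h t heq
            cases pre with
            | nil => simp at heq; rw [← heq.1]; exact pvDots_toList_length w
            | cons a pre' => simp at heq; rw [← heq.1]; exact hw a (pre' ++ x :: xs) rfl)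
      simp only [List.append_assoc, List.cons_append, List.nil_append] at this
      rw [this]
      simp [pvG, hx]
    · have hrows : pvRows (x :: xs) = (pvRows xs).map (· + 1) := by simp [pvRows, hx]
      rw [hrows, hmap]
      have := ih (pre ++ [x]) (m + 1) i w
        (by simp [hlen]; omega)
        (by intro h t heq
            cases pre with
            | nil => simp at heq; rw [← heq.1]; exact hw x xs rfl
            | cons a pre' => simp at heq; rw [← heq.1]; exact hw a (pre' ++ x :: xs) rfl)
      simp only [List.append_assoc, List.cons_append, List.nil_append] at this
      rw [this]
      simp [pvG, hx]

-- ===== VERDICT (by name: the statement is the Claim_ definition above) =====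
theorem expand_vertical_spec : Claim_equal_expand_vertical := by
  intro xs _
  unfold Spec_expand_vertical
  cases xs with
  | nil => rfl
  | cons y ys =>
    have hw : ∀ h t, ([] : List String) ++ y :: ys = h :: t → h.toList.length = y.toList.length := by
      intro h t heq; simp at heq; rw [← heq.1]
    have hr := pv_rows_eq (y :: ys) 0 []
    have ha := pv_a_eq (y :: ys) [] 0 0 y.toList.length (by simp) hw
    have hb := pv_b_eq (y :: ys) y.toList.length []
    simp only [Nat.cast_zero, Nat.zero_add, List.nil_append] at hr ha hb
    unfold expand_vertical expand_vertical_alt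
    simp only [pvDots] at hb
    rw [hr, ha, ← hb]
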